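-- pv_equiv track=rewrite | github.com/wink4u/Algorithm | 프로그래머스/파이썬/Lv3/베스트앨범.py | solution
-- ===== SOURCE A (Python) =====
-- from collections import defaultdict
--
-- def solution(genres, plays):
--     answer = []
--
--     check = defaultdict(list)
--     _sum = defaultdict(int)
--
--     for i in range(len(genres)):
--         genre = genres[i]
--
--         if _sum[genre]:
--             _sum[genre] += plays[i]
--         else:
--             _sum[genre] = plays[i]
--
--         check[genre].append([plays[i], i])
--
--     _sum_item = list(_sum.items())
--     _sum_item.sort(key=lambda x: -x[1])
--
--     for g, value in _sum_item:
--         g_list = check[g]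
--         if len(g_list) == 1:
--             answer.append(g_list[0][1])
--             continue
--         g_list.sort(key=lambda x: -x[0])
--
--         for i in range(2):
--             answer.append(g_list[i][1])
--
--     return answer
-- ===== SOURCE B (Python) =====
-- def top2(cur, p, i):
--     # update the running top-2 (stable: on equal plays the earlier index is kept)
--     if cur is None:
--         return ((p, i), None)
--     b1, b2 = cur
--     if p > b1[0]:
--         return ((p, i), b1)
--     if b2 is None or p > b2[0]:
--         return (b1, (p, i))
--     return cur
--
-- def solution(genres, plays):
--     totals = {}
--     best = {}  # genre -> ((plays, index), second (plays, index) or None)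
--     for i, (g, p) in enumerate(zip(genres, plays)):
--         totals[g] = totals.get(g, 0) + p
--         best[g] = top2(best.get(g), p, i)
--     answer = []
--     for g in sorted(totals, key=lambda g: -totals[g]):
--         b1, b2 = best[g]
--         answer.append(b1[1])
--         if b2 is not None:
--             answer.append(b2[1])
--     return answer
-- ===== Notes on version B (the rewrite author's own statement) =====
-- stated objective: alternative
-- what changed: Replaces A's per-genre sort of the full track list (and the separate items-sort of the totals dict) by a single left-to-right pass that maintains, per genre, only the running top-2 tracks (strict comparison keeps the earlier index on ties), then walks the genres sorted by descending total emitting the kept one or two indices.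
import Mathlib
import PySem

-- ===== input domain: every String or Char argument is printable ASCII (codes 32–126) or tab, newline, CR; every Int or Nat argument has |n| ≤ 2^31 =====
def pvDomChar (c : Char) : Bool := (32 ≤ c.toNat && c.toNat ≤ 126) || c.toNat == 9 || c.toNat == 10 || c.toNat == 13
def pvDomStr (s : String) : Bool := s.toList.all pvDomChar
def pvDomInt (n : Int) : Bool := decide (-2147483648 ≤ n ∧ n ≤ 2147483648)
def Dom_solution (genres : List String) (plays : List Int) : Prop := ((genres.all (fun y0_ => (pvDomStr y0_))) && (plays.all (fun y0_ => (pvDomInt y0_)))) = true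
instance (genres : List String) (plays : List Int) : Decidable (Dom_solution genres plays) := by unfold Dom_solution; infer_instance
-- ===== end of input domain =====

-- B replaces A's per-genre sort by a one-pass running top-2 per genre (stable on ties); equal return values are proved for len genres ≤ len plays.

-- ===== PORT A =====
-- The defaultdict reads `_sum[genre]` / `check[genre]` insert the key at first access; since the loop body
-- always assigns (resp. appends) right after, the unconditional insert/modify below keeps the same key order.
def solution (genres : List String) (plays : List Int) : List Int :=
  let st := (PySem.List.pyRange 0 (genres.length : Int) 1).foldl
    (fun (st : PySem.Dict String (List (Int × Int)) × PySem.Dict String Int) i =>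
      (st.1.modify (PySem.List.pyGetD genres i "") []
         (· ++ [(PySem.List.pyGetD plays i 0, i)]),
       if st.2.getD (PySem.List.pyGetD genres i "") 0 ≠ 0 then
         st.2.insert (PySem.List.pyGetD genres i "")
           (st.2.getD (PySem.List.pyGetD genres i "") 0 + PySem.List.pyGetD plays i 0)
       else
         st.2.insert (PySem.List.pyGetD genres i "") (PySem.List.pyGetD plays i 0)))
    (PySem.Dict.empty, PySem.Dict.empty)
  let sumItem := PySem.List.sorted st.2.items (fun x => -x.2) false
  sumItem.foldl
    (fun answer gv =>
      let gList := st.1.getD gv.1 []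
      if gList.length == 1 then
        answer ++ [(PySem.List.pyGetD gList 0 (0, 0)).2]
      else
        let gSorted := PySem.List.sorted gList (fun x => -x.1) false
        (PySem.List.pyRange 0 2 1).foldl
          (fun answer i => answer ++ [(PySem.List.pyGetD gSorted i (0, 0)).2]) answer)
    []

-- ===== PORT B =====
def top2 (cur : Option ((Int × Int) × Option (Int × Int))) (p i : Int) :
    (Int × Int) × Option (Int × Int) :=
  match cur with
  | none => ((p, i), none)
  | some (b1, b2) =>
    if p > b1.1 then ((p, i), some b1)
    else if (match b2 with | none => true | some b2 => decide (p > b2.1)) then (b1, some (p, i))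
    else (b1, b2)

def solution_alt (genres : List String) (plays : List Int) : List Int :=
  let st := (PySem.List.enumerate (genres.zip plays) 0).foldl
    (fun (st : PySem.Dict String Int × PySem.Dict String ((Int × Int) × Option (Int × Int))) x =>
      (st.1.insert x.2.1 (st.1.getD x.2.1 0 + x.2.2),
       st.2.insert x.2.1 (top2 (st.2.get? x.2.1) x.2.2 x.1)))
    (PySem.Dict.empty, PySem.Dict.empty)
  (PySem.List.sorted st.1.keys (fun g => -(st.1.getD g 0)) false).foldl
    (fun answer g =>
      match st.2.get? g with
      | none => answer
      | some (b1, b2) =>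
        answer ++ [b1.2] ++ (match b2 with | none => [] | some b2 => [b2.2]))
    []

-- ===== PRECONDITION & SPEC =====
-- A reads plays[i] for every i < len(genres): it raises IndexError iff len(plays) < len(genres).
def Pre_solution (genres : List String) (plays : List Int) : Prop :=
  genres.length ≤ plays.length
instance (genres : List String) (plays : List Int) : Decidable (Pre_solution genres plays) := by
  unfold Pre_solution; infer_instance
def pvWitness_solution : List String × List Int := (["pop", "rock", "pop"], [500, 600, 500])

def Spec_solution (genres : List String) (plays : List Int) (out : List Int) : Prop :=
  out = solution_alt genres plays
instance (genres : List String) (plays : List Int) (out : List Int) : Decidable (Spec_solution genres plays out) := by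
  unfold Spec_solution; infer_instance

-- ===== CLAIM (what is proved, stated in full; the proofs are below) =====
def Claim_equal_solution : Prop := ∀ (genres : List String) (plays : List Int), Dom_solution genres plays → Pre_solution genres plays → Spec_solution genres plays (solution genres plays)
-- ===== LEMMAS AND PROOFS =====

/-- The first one or two elements of a list, in the shape B's per-genre state uses. -/
def firstTwo : List (Int × Int) → Option ((Int × Int) × Option (Int × Int))
  | [] => none
  | [a] => some (a, none)
  | a :: b :: _ => some (a, some b)

lemma enumerate_getElem? {α : Type} (xs : List α) (s : Int) (k : Nat) :
    (PySem.List.enumerate xs s)[k]? = xs[k]?.map (fun v => (s + (k : Int), v)) := by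
  induction xs generalizing s k with
  | nil => simp [PySem.List.enumerate]
  | cons x t ih =>
    rw [PySem.List.enumerate_cons]
    cases k with
    | zero => simp
    | succ k' =>
      simp only [List.getElem?_cons_succ]
      rw [ih (s + 1) k']
      cases t[k']? with
      | none => simp
      | some v => simp; omega

lemma phase1_list_eq (genres : List String) (plays : List Int)
    (h : genres.length ≤ plays.length) :
    (PySem.List.pyRange 0 (genres.length : Int) 1).map
        (fun i => (PySem.List.pyGetD genres i "", PySem.List.pyGetD plays i 0, i))
      = (PySem.List.enumerate (genres.zip plays) 0).map (fun x => (x.2.1, x.2.2, x.1)) := by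
  apply List.ext_getElem
  · simp [PySem.List.length_pyRange_one, PySem.List.length_enumerate, List.length_zip]
    omega
  · intro k h1 h2
    have hk : k < genres.length := by
      simpa [PySem.List.length_pyRange_one] using h1
    have hkz : k < (genres.zip plays).length := by
      simp [List.length_zip]; omega
    simp only [List.getElem_map]
    rw [PySem.List.getElem_pyRange_one]
    have he : (PySem.List.enumerate (genres.zip plays) 0)[k]'(by rw [PySem.List.length_enumerate]; exact hkz)
        = ((0 : Int) + (k : Int), (genres.zip plays)[k]'hkz) := by
      have h1 := enumerate_getElem? (genres.zip plays) 0 k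
      rw [List.getElem?_eq_getElem hkz] at h1
      rw [List.getElem?_eq_getElem (by rw [PySem.List.length_enumerate]; exact hkz)] at h1
      exact Option.some.inj h1
    rw [he]
    have hg : PySem.List.pyGetD genres ((0 : Int) + (k : Int)) "" = genres[k] := by
      rw [show ((0 : Int) + (k : Int)) = (k : Int) by ring]
      rw [PySem.List.pyGetD_eq_getElem genres "" (by positivity) (by exact_mod_cast hk)]
      simp
    have hp : PySem.List.pyGetD plays ((0 : Int) + (k : Int)) 0 = plays[k]'(by omega) := by
      rw [show ((0 : Int) + (k : Int)) = (k : Int) by ring]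
      rw [PySem.List.pyGetD_eq_getElem plays 0 (by positivity) (by exact_mod_cast (by omega : k < plays.length))]
      simp
    rw [hg, hp]
    simp [List.getElem_zip]

lemma ft_insertBy (x : Int × Int) (S : List (Int × Int)) :
    firstTwo (PySem.List.insertBy (fun a b => decide ((-a.1 : Int) < -b.1)) x S)
      = some (top2 (firstTwo S) x.1 x.2) := by
  match S with
  | [] => simp [PySem.List.insertBy, firstTwo, top2]
  | [a] =>
    by_cases hxa : a.1 < x.1
    · simp [PySem.List.insertBy, firstTwo, top2, hxa, show (-x.1 : Int) < -a.1 by omega]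
    · simp [PySem.List.insertBy, firstTwo, top2, hxa,
        show ¬((-x.1 : Int) < -a.1) by omega]
  | a :: b :: t =>
    by_cases hxa : a.1 < x.1
    · simp [PySem.List.insertBy, firstTwo, top2, hxa, show (-x.1 : Int) < -a.1 by omega]
    · by_cases hxb : b.1 < x.1
      · simp [PySem.List.insertBy, firstTwo, top2,
          show ¬((-x.1 : Int) < -a.1) by omega, show (-x.1 : Int) < -b.1 by omega,
          show ¬(x.1 > a.1) by omega, show x.1 > b.1 by omega]
      · simp [PySem.List.insertBy, firstTwo, top2,
          show ¬((-x.1 : Int) < -a.1) by omega, show ¬((-x.1 : Int) < -b.1) by omega,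
          show ¬(x.1 > a.1) by omega, show ¬(x.1 > b.1) by omega]

lemma scan_eq_firstTwo_sorted (L : List (Int × Int)) :
    L.foldl (fun o x => some (top2 o x.1 x.2)) none
      = firstTwo (PySem.List.sorted L (fun x => -x.1) false) := by
  rw [PySem.List.sorted_eq_foldl_insertBy]
  suffices h : ∀ (M : List (Int × Int)) (S : List (Int × Int)),
      M.foldl (fun o x => some (top2 o x.1 x.2)) (firstTwo S)
        = firstTwo (M.foldl (fun acc x =>
            PySem.List.insertBy (fun a b => decide ((-a.1 : Int) < -b.1)) x acc) S) by
    simpa [firstTwo] using h L []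
  intro M
  induction M with
  | nil => intro S; simp
  | cons x t ih =>
    intro S
    simp only [List.foldl_cons]
    rw [show some (top2 (firstTwo S) x.1 x.2)
        = firstTwo (PySem.List.insertBy (fun a b => decide ((-a.1 : Int) < -b.1)) x S) from
        (ft_insertBy x S).symm]
    exact ih _

lemma get?_foldl_insert_step {α ν : Type} (l : List α) (k : α → String)
    (f : Option ν → α → ν) (d : PySem.Dict String ν) (g : String) :
    (l.foldl (fun d x => d.insert (k x) (f (d.get? (k x)) x)) d).get? g
      = (l.filter (fun x => k x == g)).foldl (fun o x => some (f o x)) (d.get? g) := by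
  induction l generalizing d with
  | nil => simp
  | cons x t ih =>
    simp only [List.foldl_cons, List.filter_cons]
    by_cases hk : k x = g
    · simp only [hk, beq_self_eq_true, if_pos, List.foldl_cons]
      rw [ih]
      congr 1
      exact PySem.Dict.get?_insert_self _ _ _
    · have : (k x == g) = false := by simp [hk]
      rw [this]
      simp only [Bool.false_eq_true, if_false]
      rw [ih]
      congr 1
      exact PySem.Dict.get?_insert_of_ne _ _ (Ne.symm hk)

lemma insertBy_map {α β : Type} (f : α → β) (bef : β → β → Bool) (x : α) (l : List α) :
    PySem.List.insertBy bef (f x) (l.map f)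
      = (PySem.List.insertBy (fun a b => bef (f a) (f b)) x l).map f := by
  induction l with
  | nil => simp [PySem.List.insertBy]
  | cons y t ih =>
    simp only [List.map_cons, PySem.List.insertBy]
    by_cases h : bef (f x) (f y)
    · simp [h]
    · simp [h, ih]

lemma sorted_map {α β κ : Type} [LT κ] [DecidableLT κ] (f : α → β) (l : List α) (key : β → κ) :
    PySem.List.sorted (l.map f) key false
      = (PySem.List.sorted l (fun x => key (f x)) false).map f := by
  rw [PySem.List.sorted_eq_foldl_insertBy, PySem.List.sorted_eq_foldl_insertBy]
  suffices h : ∀ (l : List α) (acc : List α),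
      (l.map f).foldl (fun acc x => PySem.List.insertBy (fun a b => decide (key a < key b)) x acc)
          (acc.map f)
        = (l.foldl (fun acc x =>
            PySem.List.insertBy (fun a b => decide (key (f a) < key (f b))) x acc) acc).map f by
    simpa using h l []
  intro l
  induction l with
  | nil => intro acc; simp
  | cons x t ih =>
    intro acc
    simp only [List.map_cons, List.foldl_cons]
    rw [insertBy_map f _ x acc]
    exact ih _

lemma insertBy_congr {α : Type} (b1 b2 : α → α → Bool) (x : α) (l : List α)
    (h : ∀ y ∈ l, b1 x y = b2 x y) :
    PySem.List.insertBy b1 x l = PySem.List.insertBy b2 x l := by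
  induction l with
  | nil => simp [PySem.List.insertBy]
  | cons y t ih =>
    simp only [PySem.List.insertBy]
    rw [h y (by simp)]
    by_cases hb : b2 x y
    · simp [hb]
    · simp [hb, ih (fun z hz => h z (by simp [hz]))]

lemma sorted_congr {α κ : Type} [LT κ] [DecidableLT κ] (l : List α) (k1 k2 : α → κ)
    (h : ∀ x ∈ l, k1 x = k2 x) :
    PySem.List.sorted l k1 false = PySem.List.sorted l k2 false := by
  rw [PySem.List.sorted_eq_foldl_insertBy, PySem.List.sorted_eq_foldl_insertBy]
  suffices hs : ∀ (l : List α) (acc : List α), (∀ x ∈ l, k1 x = k2 x) → (∀ x ∈ acc, k1 x = k2 x) →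
      l.foldl (fun acc x => PySem.List.insertBy (fun a b => decide (k1 a < k1 b)) x acc) acc
        = l.foldl (fun acc x => PySem.List.insertBy (fun a b => decide (k2 a < k2 b)) x acc) acc by
    exact hs l [] h (by simp)
  intro l
  induction l with
  | nil => intro acc _ _; simp
  | cons x t ih =>
    intro acc hl hacc
    simp only [List.foldl_cons]
    rw [insertBy_congr (fun a b => decide (k1 a < k1 b)) (fun a b => decide (k2 a < k2 b)) x acc
      (fun y hy => by
        show decide (k1 x < k1 y) = decide (k2 x < k2 y)
        rw [hl x (by simp), hacc y hy])]
    exact ih _ (fun z hz => hl z (by simp [hz]))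
      (fun z hz => by
        rcases (PySem.List.mem_insertBy _ _ _ _).1 hz with h1 | h2
        · rw [h1]; exact hl x (by simp)
        · exact hacc z h2)


def tripsOf (genres : List String) (plays : List Int) : List (String × Int × Int) :=
  (PySem.List.enumerate (genres.zip plays) 0).map (fun x => (x.2.1, x.2.2, x.1))

def fCheck (d : PySem.Dict String (List (Int × Int))) (t : String × Int × Int) :
    PySem.Dict String (List (Int × Int)) :=
  d.modify t.1 [] (· ++ [(t.2.1, t.2.2)])

def fSumIf (d : PySem.Dict String Int) (t : String × Int × Int) : PySem.Dict String Int :=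
  if d.getD t.1 0 ≠ 0 then d.insert t.1 (d.getD t.1 0 + t.2.1) else d.insert t.1 t.2.1

def fSum (d : PySem.Dict String Int) (t : String × Int × Int) : PySem.Dict String Int :=
  d.insert t.1 (d.getD t.1 0 + t.2.1)

def fBest (d : PySem.Dict String ((Int × Int) × Option (Int × Int))) (t : String × Int × Int) :
    PySem.Dict String ((Int × Int) × Option (Int × Int)) :=
  d.insert t.1 (top2 (d.get? t.1) t.2.1 t.2.2)

def bodyA (check : PySem.Dict String (List (Int × Int))) (answer : List Int)
    (gv : String × Int) : List Int :=
  let gList := check.getD gv.1 []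
  if gList.length == 1 then
    answer ++ [(PySem.List.pyGetD gList 0 (0, 0)).2]
  else
    let gSorted := PySem.List.sorted gList (fun x => -x.1) false
    (PySem.List.pyRange 0 2 1).foldl
      (fun answer i => answer ++ [(PySem.List.pyGetD gSorted i (0, 0)).2]) answer

def bodyB (best : PySem.Dict String ((Int × Int) × Option (Int × Int))) (answer : List Int)
    (g : String) : List Int :=
  match best.get? g with
  | none => answer
  | some (b1, b2) => answer ++ [b1.2] ++ (match b2 with | none => [] | some b2 => [b2.2])

lemma fSumIf_eq_fSum : fSumIf = fSum := by
  funext d t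
  unfold fSumIf fSum
  by_cases h : d.getD t.1 0 ≠ 0
  · simp [h]
  · rw [not_ne_iff] at h
    simp [h]

lemma foldA_eq (genres : List String) (plays : List Int) (h : genres.length ≤ plays.length) :
    (PySem.List.pyRange 0 (genres.length : Int) 1).foldl
      (fun (st : PySem.Dict String (List (Int × Int)) × PySem.Dict String Int) i =>
        (st.1.modify (PySem.List.pyGetD genres i "") []
           (· ++ [(PySem.List.pyGetD plays i 0, i)]),
         if st.2.getD (PySem.List.pyGetD genres i "") 0 ≠ 0 then
           st.2.insert (PySem.List.pyGetD genres i "")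
             (st.2.getD (PySem.List.pyGetD genres i "") 0 + PySem.List.pyGetD plays i 0)
         else
           st.2.insert (PySem.List.pyGetD genres i "") (PySem.List.pyGetD plays i 0)))
      (PySem.Dict.empty, PySem.Dict.empty)
    = ((tripsOf genres plays).foldl fCheck PySem.Dict.empty,
       (tripsOf genres plays).foldl fSum PySem.Dict.empty) := by
  have e1 : ((PySem.List.pyRange 0 (genres.length : Int) 1).map
        (fun i => (PySem.List.pyGetD genres i "", PySem.List.pyGetD plays i 0, i))).foldl
        (fun (st : PySem.Dict String (List (Int × Int)) × PySem.Dict String Int) t =>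
          (fCheck st.1 t, fSumIf st.2 t))
        (PySem.Dict.empty, PySem.Dict.empty)
      = (PySem.List.pyRange 0 (genres.length : Int) 1).foldl
        (fun (st : PySem.Dict String (List (Int × Int)) × PySem.Dict String Int) i =>
          (st.1.modify (PySem.List.pyGetD genres i "") []
             (· ++ [(PySem.List.pyGetD plays i 0, i)]),
           if st.2.getD (PySem.List.pyGetD genres i "") 0 ≠ 0 then
             st.2.insert (PySem.List.pyGetD genres i "")
               (st.2.getD (PySem.List.pyGetD genres i "") 0 + PySem.List.pyGetD plays i 0)
           else
             st.2.insert (PySem.List.pyGetD genres i "") (PySem.List.pyGetD plays i 0)))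
        (PySem.Dict.empty, PySem.Dict.empty) := by
    rw [List.foldl_map]
    rfl
  rw [← e1, phase1_list_eq genres plays h]
  rw [show (PySem.List.enumerate (genres.zip plays) 0).map (fun x => (x.2.1, x.2.2, x.1))
      = tripsOf genres plays from rfl]
  rw [fSumIf_eq_fSum]
  exact PySem.List.foldl_prod_mk fCheck fSum (tripsOf genres plays) _ _

lemma solution_shape (genres : List String) (plays : List Int)
    (h : genres.length ≤ plays.length) :
    solution genres plays =
      (PySem.List.sorted ((tripsOf genres plays).foldl fSum PySem.Dict.empty).items
          (fun x => -x.2) false).foldl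
        (bodyA ((tripsOf genres plays).foldl fCheck PySem.Dict.empty)) [] := by
  unfold solution
  rw [foldA_eq genres plays h]
  rfl

lemma foldB_eq (genres : List String) (plays : List Int) :
    (PySem.List.enumerate (genres.zip plays) 0).foldl
      (fun (st : PySem.Dict String Int ×
          PySem.Dict String ((Int × Int) × Option (Int × Int))) x =>
        (st.1.insert x.2.1 (st.1.getD x.2.1 0 + x.2.2),
         st.2.insert x.2.1 (top2 (st.2.get? x.2.1) x.2.2 x.1)))
      (PySem.Dict.empty, PySem.Dict.empty)
    = ((tripsOf genres plays).foldl fSum PySem.Dict.empty,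
       (tripsOf genres plays).foldl fBest PySem.Dict.empty) := by
  have e1 : ((PySem.List.enumerate (genres.zip plays) 0).map (fun x => (x.2.1, x.2.2, x.1))).foldl
        (fun (st : PySem.Dict String Int ×
            PySem.Dict String ((Int × Int) × Option (Int × Int))) t =>
          (fSum st.1 t, fBest st.2 t))
        (PySem.Dict.empty, PySem.Dict.empty)
      = (PySem.List.enumerate (genres.zip plays) 0).foldl
        (fun (st : PySem.Dict String Int ×
            PySem.Dict String ((Int × Int) × Option (Int × Int))) x =>
          (st.1.insert x.2.1 (st.1.getD x.2.1 0 + x.2.2),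
           st.2.insert x.2.1 (top2 (st.2.get? x.2.1) x.2.2 x.1)))
        (PySem.Dict.empty, PySem.Dict.empty) := by
    rw [List.foldl_map]
    rfl
  rw [← e1]
  exact PySem.List.foldl_prod_mk fSum fBest (tripsOf genres plays) _ _

lemma solution_alt_shape (genres : List String) (plays : List Int) :
    solution_alt genres plays =
      (PySem.List.sorted ((tripsOf genres plays).foldl fSum PySem.Dict.empty).keys
          (fun g => -(((tripsOf genres plays).foldl fSum PySem.Dict.empty).getD g 0)) false).foldl
        (bodyB ((tripsOf genres plays).foldl fBest PySem.Dict.empty)) [] := by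
  unfold solution_alt
  rw [foldB_eq genres plays]
  rfl

lemma main_eq (genres : List String) (plays : List Int) (h : genres.length ≤ plays.length) :
    solution genres plays = solution_alt genres plays := by
  rw [solution_shape genres plays h, solution_alt_shape genres plays]
  set T := tripsOf genres plays with hT
  set sum := T.foldl fSum PySem.Dict.empty with hsum
  set check := T.foldl fCheck PySem.Dict.empty with hcheckd
  set best := T.foldl fBest PySem.Dict.empty with hbestd
  have hnodup : sum.keys.Nodup := by
    rw [hsum]
    exact PySem.Dict.nodup_keys_foldl_insert_key T (fun t => t.1)
      (fun d t => d.getD t.1 0 + t.2.1) _ PySem.Dict.nodup_keys_empty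
  have hkeys : sum.keys = PySem.Set.ofList (T.map (fun t => t.1)) := by
    rw [hsum]
    rw [show (T.foldl fSum PySem.Dict.empty).keys
        = PySem.Set.update (PySem.Dict.empty : PySem.Dict String Int).keys (T.map fun t => t.1)
      from PySem.Dict.keys_foldl_insert_key T (fun t => t.1)
        (fun d t => d.getD t.1 0 + t.2.1) _]
    rw [PySem.Dict.keys_empty, PySem.Set.ofList_eq_foldl]
    rfl
  have horder : PySem.List.sorted sum.keys (fun g => -(sum.getD g 0)) false
      = (PySem.List.sorted sum.items (fun x => -x.2) false).map (fun x => x.1) := by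
    rw [show sum.keys = sum.items.map (fun x => x.1) from rfl]
    rw [sorted_map (fun x : String × Int => x.1) sum.items (fun g => -(sum.getD g 0))]
    rw [sorted_congr sum.items (fun x => -(sum.getD x.1 0)) (fun x => -x.2)
      (fun x hx => by
        show -(sum.getD x.1 0) = -x.2
        have hx' : (x.1, x.2) ∈ sum.items := by rwa [Prod.mk.eta]
        rw [PySem.Dict.getD_of_mem_items sum hx' hnodup 0])]
  rw [horder, List.foldl_map]
  apply PySem.List.foldl_congr_mem
  intro ans gv hgv
  have hgv' : gv ∈ sum.items := (PySem.List.mem_sorted _ _ _ _).1 hgv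
  have hcheck : check.getD gv.1 [] =
      (T.filter (fun t => t.1 == gv.1)).map (fun t => (t.2.1, t.2.2)) := by
    rw [hcheckd]
    rw [show T.foldl fCheck PySem.Dict.empty
        = (T.map (fun t => (t.1, (t.2.1, t.2.2)))).foldl
            (fun d p => d.modify p.1 [] (· ++ [p.2])) PySem.Dict.empty from by
      rw [List.foldl_map]; rfl]
    rw [PySem.Dict.getD_foldl_modify_append, List.filter_map, List.map_map]
    simp [Function.comp_def]
  have hbest : best.get? gv.1 =
      firstTwo (PySem.List.sorted
        ((T.filter (fun t => t.1 == gv.1)).map (fun t => (t.2.1, t.2.2)))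
        (fun x => -x.1) false) := by
    rw [hbestd]
    have e1 := get?_foldl_insert_step T (fun t => t.1)
      (fun o (t : String × Int × Int) => top2 o t.2.1 t.2.2) PySem.Dict.empty gv.1
    rw [PySem.Dict.get?_empty] at e1
    rw [show T.foldl fBest PySem.Dict.empty
        = T.foldl (fun d t => d.insert t.1 (top2 (d.get? t.1) t.2.1 t.2.2)) PySem.Dict.empty
      from rfl]
    rw [e1, ← scan_eq_firstTwo_sorted, List.foldl_map]
  have hmem : gv.1 ∈ T.map (fun t => t.1) := by
    have h1 : gv.1 ∈ sum.keys := by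
      rw [show sum.keys = sum.items.map (fun x => x.1) from rfl]
      exact List.mem_map_of_mem hgv'
    rw [hkeys] at h1
    exact (PySem.Set.mem_ofList _ _).1 h1
  have hocc_ne : (T.filter (fun t => t.1 == gv.1)).map
      (fun t : String × Int × Int => (t.2.1, t.2.2)) ≠ [] := by
    obtain ⟨t0, ht0, ht0g⟩ := List.mem_map.1 hmem
    have ht0f : t0 ∈ T.filter (fun t => t.1 == gv.1) := List.mem_filter.2 ⟨ht0, by simp [ht0g]⟩
    intro hnil
    rw [List.map_eq_nil_iff] at hnil
    rw [hnil] at ht0f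
    simp at ht0f
  cases hS : PySem.List.sorted
      ((T.filter (fun t => t.1 == gv.1)).map (fun t => (t.2.1, t.2.2)))
      (fun x => -x.1) false with
  | nil => exact absurd ((PySem.List.sorted_eq_nil_iff _ _ _).1 hS) hocc_ne
  | cons a s2 =>
    cases s2 with
    | nil =>
      have hlen : ((T.filter (fun t => t.1 == gv.1)).map
          (fun t : String × Int × Int => (t.2.1, t.2.2))).length = 1 := by
        have hl := PySem.List.length_sorted
          ((T.filter (fun t => t.1 == gv.1)).map (fun t => (t.2.1, t.2.2)))
          (fun x : Int × Int => -x.1) false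
        rw [hS] at hl
        simpa using hl.symm
      obtain ⟨x, hx⟩ := List.length_eq_one_iff.1 hlen
      have hax : a = x := by
        rw [hx] at hS
        have hsx : PySem.List.sorted [x] (fun y : Int × Int => -y.1) false = [x] := rfl
        rw [hsx] at hS
        exact (List.cons.injEq _ _ _ _ ▸ hS).1.symm
      unfold bodyA bodyB
      rw [hcheck, hbest, hS, hx]
      simp [firstTwo, PySem.List.pyGetD_zero_cons, hax]
    | cons b s3 =>
      have hlen : ((T.filter (fun t => t.1 == gv.1)).map
          (fun t : String × Int × Int => (t.2.1, t.2.2))).length = s3.length + 2 := by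
        have hl := PySem.List.length_sorted
          ((T.filter (fun t => t.1 == gv.1)).map (fun t => (t.2.1, t.2.2)))
          (fun x : Int × Int => -x.1) false
        rw [hS] at hl
        simpa using hl.symm
      unfold bodyA bodyB
      rw [hcheck, hbest, hS]
      simp [firstTwo, hlen, show PySem.List.pyRange 0 2 1 = [0, 1] from by decide,
        PySem.List.pyGetD_ofNat', hS]

theorem solution_spec : Claim_equal_solution := by
  intro genres plays _ hpre
  unfold Spec_solution
  exact main_eq genres plays hpre
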